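-- pv_equiv track=rewrite | github.com/DanielElisenberg/aoc2022 | python/day12/day12.py | find_start_and_goal
-- ===== SOURCE A (Python) =====
-- def find_start_and_goal(
--     height_map: list[list[str]]
-- ) -> tuple[tuple[int, int], tuple[int, int]]:
--     start = sum([
--         [(y, x) for x, _ in enumerate(row) if height_map[y][x] == 'S']
--         for y, row in enumerate(height_map)
--     ], [])[0]
--     goal = sum([
--         [(y, x) for x, _ in enumerate(row) if height_map[y][x] == 'E']
--         for y, row in enumerate(height_map)
--     ], [])[0]
--     return start, goal
-- ===== SOURCE B (Python) =====
-- def find_start_and_goal(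
--     height_map: list[list[str]]
-- ) -> tuple[tuple[int, int], tuple[int, int]]:
--     start = None
--     goal = None
--     for y, row in enumerate(height_map):
--         for x, c in enumerate(row):
--             if start is None and c == 'S':
--                 start = (y, x)
--             if goal is None and c == 'E':
--                 goal = (y, x)
--             if start is not None and goal is not None:
--                 return start, goal
--     return start, goal
-- ===== Notes on version B (the rewrite author's own statement) =====
-- stated objective: faster
-- what changed: Replaces A's two full comprehension scans (each materialising per-row lists and flattening them with quadratic sum(..., []), with redundant height_map[y][x] lookups) by one early-exiting nested loop that tracks the first 'S' and first 'E' in a single pass.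
-- outside the precondition, e.g. on find_start_and_goal([]): A raises IndexError, B returns (None, None)
import Mathlib
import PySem

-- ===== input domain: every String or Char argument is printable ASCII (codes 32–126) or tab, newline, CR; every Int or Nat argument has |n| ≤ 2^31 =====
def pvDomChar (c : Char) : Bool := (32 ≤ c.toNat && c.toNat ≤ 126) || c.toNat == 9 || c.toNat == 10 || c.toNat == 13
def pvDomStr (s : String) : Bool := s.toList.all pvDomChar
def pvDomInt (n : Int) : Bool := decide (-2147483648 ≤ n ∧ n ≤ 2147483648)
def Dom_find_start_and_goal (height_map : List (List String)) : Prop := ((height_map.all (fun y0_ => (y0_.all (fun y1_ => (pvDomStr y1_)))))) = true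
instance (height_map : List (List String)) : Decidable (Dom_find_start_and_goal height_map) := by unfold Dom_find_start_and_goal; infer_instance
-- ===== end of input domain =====

-- B scans the grid once with an early exit instead of A's two full comprehension passes.
-- Pre_ excludes grids without an 'S' or without an 'E', where Python A raises IndexError.

-- ===== PORT A =====
-- height_map[y][x]: y and x always come from enumerate, hence in range, so the
-- .getD defaults are never reached — exact on every reachable lookup.
def pvCellA (height_map : List (List String)) (y x : Int) : String :=
  (PySem.List.pyGet? ((PySem.List.pyGet? height_map y).getD []) x).getD ""

-- the inner list comprehension for one row of the outer comprehension
def pvRowHitsA (height_map : List (List String)) (c : String) (yr : Int × List String) : List (Int × Int) :=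
  (PySem.List.enumerate yr.2 0).filterMap
    (fun xc => if pvCellA height_map yr.1 xc.1 = c then some (yr.1, xc.1) else none)

-- sum([...], [])[0] : fold of list concatenation, then index 0 (none = IndexError, excluded by Pre_)
def pvFirstA (height_map : List (List String)) (c : String) : (Int × Int) :=
  (PySem.List.pyGet?
    (List.foldl (· ++ ·) []
      ((PySem.List.enumerate height_map 0).map (pvRowHitsA height_map c))) 0).getD (-1, -1)

def find_start_and_goal (height_map : List (List String)) : (Int × Int) × (Int × Int) :=
  let start := pvFirstA height_map "S"
  let goal := pvFirstA height_map "E"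
  (start, goal)

-- ===== PORT B =====
-- inner 'for x, c in enumerate(row)' loop; the Bool is true when the early 'return' fired
def pvScanRow (y : Int) (cells : List (Int × String))
    (s g : Option (Int × Int)) : (Option (Int × Int) × Option (Int × Int)) × Bool :=
  match cells with
  | [] => ((s, g), false)
  | xc :: rest =>
    let s' := if s = none ∧ xc.2 = "S" then some (y, xc.1) else s
    let g' := if g = none ∧ xc.2 = "E" then some (y, xc.1) else g
    if s' ≠ none ∧ g' ≠ none then ((s', g'), true)
    else pvScanRow y rest s' g'

-- outer 'for y, row in enumerate(height_map)' loop
def pvScanGrid (rows : List (Int × List String))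
    (s g : Option (Int × Int)) : Option (Int × Int) × Option (Int × Int) :=
  match rows with
  | [] => (s, g)
  | yr :: rest =>
    let r := pvScanRow yr.1 (PySem.List.enumerate yr.2 0) s g
    if r.2 then r.1 else pvScanGrid rest r.1.1 r.1.2

-- 'return start, goal' with start/goal possibly still None (only outside Pre_): .getD defaults
def find_start_and_goal_alt (height_map : List (List String)) : (Int × Int) × (Int × Int) :=
  let r := pvScanGrid (PySem.List.enumerate height_map 0) none none
  (r.1.getD (-1, -1), r.2.getD (-1, -1))

-- ===== PRECONDITION & SPEC =====
-- Pre_ : exactly the inputs where Python A returns (an 'S' cell and an 'E' cell both exist);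
-- elsewhere A raises IndexError on [...][0].
def Pre_find_start_and_goal (height_map : List (List String)) : Prop :=
  (∃ row ∈ height_map, "S" ∈ row) ∧ (∃ row ∈ height_map, "E" ∈ row)
instance (height_map : List (List String)) : Decidable (Pre_find_start_and_goal height_map) := by
  unfold Pre_find_start_and_goal; infer_instance

def pvWitness_find_start_and_goal : List (List String) := [["S", "a"], ["b", "E"]]

def Spec_find_start_and_goal (height_map : List (List String)) (out : (Int × Int) × (Int × Int)) : Prop := out = find_start_and_goal_alt height_map
instance (height_map : List (List String)) (out : (Int × Int) × (Int × Int)) : Decidable (Spec_find_start_and_goal height_map out) := by unfold Spec_find_start_and_goal; infer_instance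

-- ===== CLAIM (what is proved, stated in full; the proofs are below) =====
def Claim_equal_find_start_and_goal : Prop := ∀ (height_map : List (List String)), Dom_find_start_and_goal height_map → Pre_find_start_and_goal height_map → Spec_find_start_and_goal height_map (find_start_and_goal height_map)

-- ===== LEMMAS AND PROOFS =====

-- the row-major occurrence list of marker c over already-enumerated rows
def pvOcc (c : String) (rows : List (Int × List String)) : List (Int × Int) :=
  rows.flatMap (fun yr =>
    (PySem.List.enumerate yr.2 0).filterMap
      (fun xc => if xc.2 = c then some (yr.1, xc.1) else none))

theorem pvScanRow_fst (y : Int) (cells : List (Int × String)) (s g : Option (Int × Int)) :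
    (pvScanRow y cells s g).1 =
      (s.or ((cells.filterMap (fun xc => if xc.2 = "S" then some (y, xc.1) else none)).head?),
       g.or ((cells.filterMap (fun xc => if xc.2 = "E" then some (y, xc.1) else none)).head?)) := by
  induction cells generalizing s g with
  | nil => simp [pvScanRow]
  | cons xc rest ih =>
    by_cases hs : xc.2 = "S" <;> by_cases hg : xc.2 = "E"
    · rw [hs] at hg; exact absurd hg (by decide)
    all_goals cases s <;> cases g <;>
      simp [pvScanRow, hs, hg, ih]

theorem pvScanRow_done (y : Int) (cells : List (Int × String)) (s g : Option (Int × Int)) :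
    (pvScanRow y cells s g).2 = true →
      (pvScanRow y cells s g).1.1 ≠ none ∧ (pvScanRow y cells s g).1.2 ≠ none := by
  induction cells generalizing s g with
  | nil => simp [pvScanRow]
  | cons xc rest ih =>
    by_cases hs : xc.2 = "S" <;> by_cases hg : xc.2 = "E"
    · rw [hs] at hg; exact absurd hg (by decide)
    all_goals cases s <;> cases g <;>
      simp only [pvScanRow, hs, hg] <;>
      simp <;> (try exact ih _ _)

theorem pvScanGrid_eq (rows : List (Int × List String)) (s g : Option (Int × Int)) :
    pvScanGrid rows s g = (s.or ((pvOcc "S" rows).head?), g.or ((pvOcc "E" rows).head?)) := by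
  induction rows generalizing s g with
  | nil => simp [pvScanGrid, pvOcc]
  | cons yr rest ih =>
    simp only [pvScanGrid]
    have hfst := pvScanRow_fst yr.1 (PySem.List.enumerate yr.2 0) s g
    have hocc : ∀ c, pvOcc c (yr :: rest) =
        ((PySem.List.enumerate yr.2 0).filterMap
          (fun xc => if xc.2 = c then some (yr.1, xc.1) else none)) ++ pvOcc c rest := by
      intro c; simp [pvOcc]
    split
    · rename_i hdone
      obtain ⟨h1, h2⟩ := pvScanRow_done yr.1 (PySem.List.enumerate yr.2 0) s g hdone
      rw [hfst] at h1 h2 ⊢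
      rw [hocc "S", hocc "E"]
      simp only [List.head?_append, Prod.mk.injEq]
      simp only at h1 h2
      constructor
      · cases s with
        | some v => simp
        | none =>
          simp only [Option.none_or] at h1 ⊢
          cases hh : (List.filterMap _ _).head? with
          | none => rw [hh] at h1; exact absurd rfl h1
          | some v => simp
      · cases g with
        | some v => simp
        | none =>
          simp only [Option.none_or] at h2 ⊢
          cases hh : (List.filterMap _ _).head? with
          | none => rw [hh] at h2; exact absurd rfl h2
          | some v => simp
    · rw [ih, hfst]
      rw [hocc "S", hocc "E"]
      simp only [List.head?_append]
      simp [Option.or_assoc]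

-- A's flattened comprehension IS the occurrence list (the hm[y][x] lookup hits the enumerated cell)
theorem pvFirstA_eq (height_map : List (List String)) (c : String) :
    pvFirstA height_map c =
      ((pvOcc c (PySem.List.enumerate height_map 0)).head?).getD (-1, -1) := by
  have hL : List.foldl (· ++ ·) []
      ((PySem.List.enumerate height_map 0).map (pvRowHitsA height_map c)) =
      pvOcc c (PySem.List.enumerate height_map 0) := by
    rw [PySem.List.foldl_append_eq_flatten, List.nil_append, ← List.flatMap_def]
    apply List.flatMap_congr
    intro yr hyr
    obtain ⟨k, hk, rfl⟩ := (PySem.List.mem_enumerate_iff _ _ _).1 hyr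
    unfold pvRowHitsA
    apply List.filterMap_congr
    intro xc hxc
    obtain ⟨j, hj, rfl⟩ := (PySem.List.mem_enumerate_iff _ _ _).1 hxc
    simp only [zero_add] at hj ⊢
    have hcell : pvCellA height_map (k : Int) (j : Int) = height_map[k][j] := by
      unfold pvCellA
      simp [hk, hj]
    simp [hcell]
  unfold pvFirstA
  rw [hL]
  rw [show (0:Int) = ((0:Nat):Int) from rfl, PySem.List.pyGet?_natCast]
  cases pvOcc c (PySem.List.enumerate height_map 0) <;> simp

-- ===== VERDICT (by name: the statement is the Claim_ definition above) =====
theorem find_start_and_goal_spec : Claim_equal_find_start_and_goal := by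
  intro hm _ _
  show _ = _
  simp [find_start_and_goal, find_start_and_goal_alt, pvFirstA_eq, pvScanGrid_eq]
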